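-- pv_equiv track=rewrite | github.com/star177/Aprendizados-Python | rasc3.py | computador_escolhe_jogada
-- ===== SOURCE A (Python) =====
-- def computador_escolhe_jogada(n, m):
--     mult = m + 1
--     i = 1
--     resto = m
--     while resto % mult != 0:
--         resto = n - i
--         if resto % mult == 0:
--             return(i)
--         else:
--             i = i+1
-- ===== SOURCE B (Python) =====
-- def computador_escolhe_jogada(n, m):
--     period = abs(m + 1)
--     r = n % period
--     return r if r != 0 else period
-- ===== Notes on version B (the rewrite author's own statement) =====
-- stated objective: faster
-- what changed: Replaces the linear up-from-1 search for the smallest i with (n-i) divisible by m+1 by a direct O(1) modular computation r = n % abs(m+1), returning r (or the period when r is 0).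
-- intended difference: For m = 0 and m = -2 (divisor m+1 = ±1, which divides everything) A's mis-placed loop condition makes it exit before checking any move and return None, while B returns 1, the smallest valid move, which is the intended value. — e.g. on computador_escolhe_jogada(5, 0): A returns none, B returns some 1
import Mathlib
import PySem

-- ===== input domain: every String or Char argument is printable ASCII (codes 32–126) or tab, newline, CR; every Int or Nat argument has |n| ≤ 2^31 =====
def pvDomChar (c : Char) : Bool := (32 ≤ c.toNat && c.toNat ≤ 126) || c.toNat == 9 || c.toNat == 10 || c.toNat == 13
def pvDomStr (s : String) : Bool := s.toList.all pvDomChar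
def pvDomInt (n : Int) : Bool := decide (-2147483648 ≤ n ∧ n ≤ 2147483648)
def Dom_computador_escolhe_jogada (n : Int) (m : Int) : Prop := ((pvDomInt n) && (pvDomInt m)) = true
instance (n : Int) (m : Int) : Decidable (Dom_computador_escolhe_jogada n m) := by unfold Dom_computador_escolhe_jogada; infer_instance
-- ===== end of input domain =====

-- B replaces A's linear search for the smallest i with (n-i) divisible by m+1
-- by a direct O(1) modular computation; on m ∈ {0,-2} A accidentally returns None
-- where B returns the intended smallest move 1 (stated as D_ below).


-- ===== PORT A =====
-- the while loop of A, fuel-bounded (fuel only makes the recursion total: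
-- for m ≠ -1 the loop terminates within |m+1|+1 iterations, see the proofs)
def pvLoopA (n mult : Int) : Nat → Int → Int → Option Int
  | 0, _, _ => none
  | fuel+1, i, resto =>
    if PySem.Int.mod resto mult ≠ 0 then
      let resto' := n - i
      if PySem.Int.mod resto' mult = 0 then some i
      else pvLoopA n mult fuel (i+1) resto'
    else none

def computador_escolhe_jogada (n : Int) (m : Int) : Option Int :=
  pvLoopA n (m+1) ((m+1).natAbs + 2) 1 m

-- ===== PORT B =====
def computador_escolhe_jogada_alt (n : Int) (m : Int) : Option Int :=
  let period := |m + 1|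
  let r := PySem.Int.mod n period
  if r ≠ 0 then some r else some period

-- ===== PRECONDITION & SPEC =====
-- Pre_ excludes exactly m = -1, where both Pythons raise ZeroDivisionError (modulo by m+1 = 0).
def Pre_computador_escolhe_jogada (n : Int) (m : Int) : Prop := m ≠ -1
instance (n : Int) (m : Int) : Decidable (Pre_computador_escolhe_jogada n m) := by unfold Pre_computador_escolhe_jogada; infer_instance
def pvWitness_computador_escolhe_jogada : Int × Int := (10, 3)

-- For m = 0 and m = -2 (divisor m+1 = ±1, which divides everything) A's mis-placed loop
-- condition makes it exit before checking any move and return None, while B returns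
-- some 1, the smallest valid move, which is the intended value.
def D_computador_escolhe_jogada (n : Int) (m : Int) : Prop := m = 0 ∨ m = -2
instance (n : Int) (m : Int) : Decidable (D_computador_escolhe_jogada n m) := by unfold D_computador_escolhe_jogada; infer_instance

def Spec_computador_escolhe_jogada (n : Int) (m : Int) (out : Option Int) : Prop :=
  ¬ D_computador_escolhe_jogada n m → out = computador_escolhe_jogada_alt n m
instance (n : Int) (m : Int) (out : Option Int) : Decidable (Spec_computador_escolhe_jogada n m out) := by unfold Spec_computador_escolhe_jogada; infer_instance

def pvDiffWitness_computador_escolhe_jogada : Int × Int := (5, 0)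
def pvDiffWitnessOut_computador_escolhe_jogada : (Option Int) × (Option Int) := (none, some 1)

-- ===== CLAIM =====
def Claim_unchanged_computador_escolhe_jogada : Prop := ∀ (n : Int) (m : Int), Dom_computador_escolhe_jogada n m → Pre_computador_escolhe_jogada n m → Spec_computador_escolhe_jogada n m (computador_escolhe_jogada n m)
def Claim_changed_computador_escolhe_jogada : Prop := Dom_computador_escolhe_jogada (pvDiffWitness_computador_escolhe_jogada.1) (pvDiffWitness_computador_escolhe_jogada.2) ∧ Pre_computador_escolhe_jogada (pvDiffWitness_computador_escolhe_jogada.1) (pvDiffWitness_computador_escolhe_jogada.2) ∧ D_computador_escolhe_jogada (pvDiffWitness_computador_escolhe_jogada.1) (pvDiffWitness_computador_escolhe_jogada.2) ∧ computador_escolhe_jogada (pvDiffWitness_computador_escolhe_jogada.1) (pvDiffWitness_computador_escolhe_jogada.2) = pvDiffWitnessOut_computador_escolhe_jogada.1 ∧ computador_escolhe_jogada_alt (pvDiffWitness_computador_escolhe_jogada.1) (pvDiffWitness_computador_escolhe_jogada.2) = pvDiffWitnessOut_computador_escolhe_jogada.2 ∧ pvDiffWitnessOut_computador_escolhe_jogada.1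 ≠ pvDiffWitnessOut_computador_escolhe_jogada.2
def Claim_exact_computador_escolhe_jogada : Prop := ∀ (n : Int) (m : Int), Dom_computador_escolhe_jogada n m → Pre_computador_escolhe_jogada n m → D_computador_escolhe_jogada n m → computador_escolhe_jogada n m ≠ computador_escolhe_jogada_alt n m

-- ===== LEMMAS AND PROOFS =====

-- the loop returns the first j ≥ i with (m+1) ∣ (n - j), namely i + (n - i) % |mult|
lemma pvLoopA_eq (n mult : Int) (hM : 2 ≤ |mult|) :
    ∀ (fuel : Nat) (i resto : Int), ¬ mult ∣ resto →
      ((n - i) % |mult|).toNat < fuel →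
      pvLoopA n mult fuel i resto = some (i + (n - i) % |mult|) := by
  intro fuel
  induction fuel with
  | zero => intro i resto _ h; omega
  | succ fuel ih =>
    intro i resto hnd hf
    have hmne : mult ≠ 0 := by intro h; rw [h] at hM; simp at hM
    have habs : |mult| ≠ 0 := by positivity
    have hpos : (0:Int) < |mult| := by positivity
    rw [pvLoopA]
    rw [if_pos (by
      intro h
      exact hnd ((PySem.Int.mod_eq_zero_iff_dvd resto mult).mp h))]
    by_cases hdvd : mult ∣ (n - i)
    · rw [if_pos ((PySem.Int.mod_eq_zero_iff_dvd _ _).mpr hdvd)]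
      have : (n - i) % |mult| = 0 :=
        Int.emod_eq_zero_of_dvd ((abs_dvd mult (n-i)).mpr hdvd)
      rw [this]; simp
    · rw [if_neg (by
        intro h
        exact hdvd ((PySem.Int.mod_eq_zero_iff_dvd _ _).mp h))]
      have hr0 : (n - i) % |mult| ≠ 0 := by
        intro h
        exact hdvd ((abs_dvd mult (n-i)).mp (Int.dvd_of_emod_eq_zero h))
      have hrlb : 1 ≤ (n - i) % |mult| := by
        have := Int.emod_nonneg (n - i) habs
        omega
      have hrub : (n - i) % |mult| < |mult| := Int.emod_lt_of_pos _ hpos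
      have hstep : (n - (i+1)) % |mult| = (n - i) % |mult| - 1 := by
        have h1 : n - (i+1) = (n - i) - 1 := by ring
        rw [h1, Int.sub_emod]
        have h2 : (1:Int) % |mult| = 1 := Int.emod_eq_of_lt (by omega) (by omega)
        rw [h2]
        exact Int.emod_eq_of_lt (by omega) (by omega)
      rw [ih (i+1) (n - i) hdvd (by omega)]
      rw [hstep]
      congr 1
      ring

lemma pvB_eq (n m : Int) (hM : 2 ≤ |m + 1|) :
    computador_escolhe_jogada_alt n m = some (1 + (n - 1) % |m + 1|) := by
  unfold computador_escolhe_jogada_alt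
  have hpos : (0:Int) < |m + 1| := by omega
  have hmod : PySem.Int.mod n |m + 1| = n % |m + 1| := PySem.Int.mod_eq_emod_of_pos hpos
  simp only [hmod]
  have hsub : n - 1 = n + (-1) := by ring
  by_cases h : n % |m + 1| = 0
  · rw [if_neg (by simpa using h)]
    obtain ⟨q, hq⟩ : |m + 1| ∣ n := Int.dvd_of_emod_eq_zero h
    have hrw : n - 1 = (|m + 1| - 1) + |m + 1| * (q - 1) := by rw [hq]; ring
    have : (n - 1) % |m + 1| = |m + 1| - 1 := by
      rw [hrw, Int.add_mul_emod_self_left]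
      exact Int.emod_eq_of_lt (by omega) (by omega)
    rw [this]; congr 1; ring
  · rw [if_pos (by simpa using h)]
    have hlb := Int.emod_nonneg n (by omega : |m+1| ≠ 0)
    have hub := Int.emod_lt_of_pos n hpos
    have : (n - 1) % |m + 1| = n % |m + 1| - 1 := by
      rw [Int.sub_emod]
      have h2 : (1:Int) % |m+1| = 1 := Int.emod_eq_of_lt (by omega) (by omega)
      rw [h2]
      exact Int.emod_eq_of_lt (by omega) (by omega)
    rw [this]; congr 1; ring

-- ===== VERDICT =====
theorem computador_escolhe_jogada_spec : Claim_unchanged_computador_escolhe_jogada := by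
  intro n m _ hpre hD
  have hM : 2 ≤ |m + 1| := by
    unfold Pre_computador_escolhe_jogada at hpre
    unfold D_computador_escolhe_jogada at hD
    rcases lt_trichotomy (m+1) 0 with h | h | h
    · rw [abs_of_neg h]; omega
    · omega
    · rw [abs_of_pos h]; omega
  unfold computador_escolhe_jogada
  rw [pvLoopA_eq n (m+1) hM _ 1 m
    (by intro ⟨k, hk⟩
        have h1 : (m+1) ∣ 1 := ⟨1 - k, by linarith [hk]⟩
        have h2 : |m+1| ∣ 1 := (abs_dvd _ _).mpr h1
        have := Int.le_of_dvd (by omega) h2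
        omega)
    (by
      have hlb := Int.emod_nonneg (n - 1) (by omega : |m+1| ≠ 0)
      have hub := Int.emod_lt_of_pos (n - 1) (by omega : (0:Int) < |m+1|)
      have hcast : |m + 1| = ((m+1).natAbs : Int) := Int.abs_eq_natAbs _
      omega)]
  rw [pvB_eq n m hM]

theorem computador_escolhe_jogada_changed : Claim_changed_computador_escolhe_jogada := by
  unfold Claim_changed_computador_escolhe_jogada; decide

theorem computador_escolhe_jogada_tight : Claim_exact_computador_escolhe_jogada := by
  intro n m _ _ hD
  unfold D_computador_escolhe_jogada at hD
  have hA : computador_escolhe_jogada n m = none := by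
    rcases hD with h | h <;> subst h <;> rfl
  have hB : computador_escolhe_jogada_alt n m = some 1 := by
    have h1 : PySem.Int.mod n 1 = 0 := by
      rw [PySem.Int.mod_eq_emod_of_pos (by norm_num : (0:Int) < 1)]
      exact Int.emod_one n
    rcases hD with h | h <;> subst h <;>
      norm_num [computador_escolhe_jogada_alt, h1]
  rw [hA, hB]; simp
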